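-- pv_equiv track=rewrite | github.com/deborahwatty/gpt_taiwan_braille | moedict_api.py | get_valid_segmentations
-- ===== SOURCE A (Python) =====
-- def get_all_segmentations(s):
--     if len(s) == 0:
--         return [[]]
--     if len(s) == 1:
--         return [[s]]
--     result = []
--     for i in range(1, len(s)+1):
--         prefix = s[:i]
--         suffixes = get_all_segmentations(s[i:])
--         for suffix in suffixes:
--             result.append([prefix] + suffix)
--     return sorted(result, key=lambda x: len(x))
--
-- def get_valid_segmentations(sentence, pronunciation_dict):
--     valid_segmentations = []
--     segmentations = get_all_segmentations(sentence)
--     for segmentation in segmentations: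
--         if len(valid_segmentations) == 0 or len(segmentation) <= len(valid_segmentations[0][0]):
--             pronunciation = list()
--             for token in segmentation:
--                 if token in pronunciation_dict.keys():
--                     pronunciation.append(pronunciation_dict[token])
--                 else:
--                     break
--             if len(pronunciation) == len(segmentation):
--                 valid_segmentations.append((segmentation, pronunciation))
--     return valid_segmentations
-- ===== SOURCE B (Python) =====
-- def get_valid_segmentations(sentence, pronunciation_dict):
--     # One backward DP pass: table[k] = (min_tok, min_segs) for the suffix sentence[j+k:],
--     # where min_tok is the least number of tokens in a fully-pronounceable segmentation
--     # (None if there is none) and min_segs lists all such minimal segmentations, ordered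
--     # by first-token length ascending, then recursively.
--     table = [(0, [[]])]
--     for j in range(len(sentence) - 1, -1, -1):
--         s = sentence[j:]
--         best = None
--         for i, (mt, _) in enumerate(table, 1):
--             if mt is not None and s[:i] in pronunciation_dict:
--                 if best is None or mt + 1 < best:
--                     best = mt + 1
--         cur = []
--         if best is not None:
--             for i, (mt, suf) in enumerate(table, 1):
--                 if mt == best - 1 and s[:i] in pronunciation_dict:
--                     for rest in suf:
--                         cur.append([s[:i]] + rest)
--         table = [(best, cur)] + table
--     return [(seg, [pronunciation_dict[t] for t in seg]) for seg in table[0][1]]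
-- ===== Notes on version B (the rewrite author's own statement) =====
-- stated objective: faster
-- what changed: A enumerates all 2^(n-1) segmentations of the sentence (sorting them by token count at every recursion level) and then filters; B makes one backward DP pass computing, per suffix, the minimal pronounceable token count and only the minimal valid segmentations, never materialising invalid or non-minimal segmentations.
import Mathlib
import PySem

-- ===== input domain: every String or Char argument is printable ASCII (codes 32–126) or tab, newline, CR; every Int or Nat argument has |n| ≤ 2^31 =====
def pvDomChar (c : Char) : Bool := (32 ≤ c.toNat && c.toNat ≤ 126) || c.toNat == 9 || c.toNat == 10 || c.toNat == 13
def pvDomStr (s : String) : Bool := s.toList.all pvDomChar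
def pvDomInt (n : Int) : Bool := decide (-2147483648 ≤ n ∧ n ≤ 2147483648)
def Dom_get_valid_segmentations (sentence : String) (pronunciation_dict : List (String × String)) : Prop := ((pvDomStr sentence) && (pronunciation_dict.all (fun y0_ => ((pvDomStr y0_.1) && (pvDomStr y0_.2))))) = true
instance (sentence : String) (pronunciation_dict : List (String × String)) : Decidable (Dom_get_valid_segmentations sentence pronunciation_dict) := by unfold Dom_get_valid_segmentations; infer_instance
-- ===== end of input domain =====

-- ===== PORT A =====
-- B re-implements A's exponential enumerate-all-segmentations-then-filter with a backward DP
-- (min token count + minimal segmentations per suffix); equal return value proved below.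

-- inner loop of A: "for token in segmentation: append pronunciation or break"
def pvPronLoop (d : PySem.Dict String String) : List String → List String
  | [] => []
  | t :: ts => if d.contains t then d.getD t "" :: pvPronLoop d ts else []

-- helper get_all_segmentations, on the sentence's code points (s[:i] / s[i:] via PySem slices)
def get_all_segmentations_chars (s : List Char) : List (List String) :=
  if h0 : PySem.List.len s = 0 then [[]]
  else if h1 : PySem.List.len s = 1 then [[String.ofList s]]
  else
    let result := (PySem.List.pyRange 1 (PySem.List.len s + 1) 1).attach.foldl
      (fun result i =>
        let pre := String.ofList (PySem.List.slice s none (some i.1))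
        let suffixes := get_all_segmentations_chars (PySem.List.slice s (some i.1) none)
        suffixes.foldl (fun result suffix => result ++ [pre :: suffix]) result)
      []
    PySem.List.sorted result (fun x => PySem.List.len x)
termination_by s.length
decreasing_by
  have hb := (PySem.List.mem_pyRange_one).1 i.2
  simp only [PySem.List.len_eq] at hb h0
  rw [PySem.List.slice_from s (by omega)]
  simp only [List.length_drop]
  omega

def get_valid_segmentations (sentence : String) (pronunciation_dict : List (String × String)) : List (List String × List String) :=
  let d := PySem.Dict.mk pronunciation_dict
  let segmentations := get_all_segmentations_chars sentence.toList
  segmentations.foldl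
    (fun valid_segmentations segmentation =>
      if PySem.List.len valid_segmentations = 0 ∨
          PySem.List.len segmentation ≤ PySem.List.len (PySem.List.pyGetD valid_segmentations 0 ([], [])).1 then
        let pronunciation := pvPronLoop d segmentation
        if PySem.List.len pronunciation = PySem.List.len segmentation then
          valid_segmentations ++ [(segmentation, pronunciation)]
        else valid_segmentations
      else valid_segmentations)
    []

-- ===== PORT B =====
-- one backward DP pass of Source B: table entry = (min token count, minimal valid segmentations)
-- for each suffix; the loop "for j in range(n-1, -1, -1): s = sentence[j:]" is the structural
-- recursion on the suffix's code points (s[:i] = take i, enumerate(table, 1) = zipIdx 1)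
def pvBuild (d : PySem.Dict String String) : List Char → List (Option Nat × List (List String))
  | [] => [(some 0, [[]])]
  | c :: cs =>
    let table := pvBuild d cs
    let s := c :: cs
    let best := (table.zipIdx 1).foldl
      (fun best p =>
        match p.1.1 with
        | some mt =>
          if d.contains (String.ofList (s.take p.2)) then
            match best with
            | none => some (mt + 1)
            | some b => if mt + 1 < b then some (mt + 1) else some b
          else best
        | none => best)
      none
    let cur :=
      match best with
      | none => []
      | some b =>
        (table.zipIdx 1).foldl
          (fun cur p =>
            if p.1.1 = some (b - 1) ∧ d.contains (String.ofList (s.take p.2)) = true then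
              p.1.2.foldl (fun cur rest => cur ++ [String.ofList (s.take p.2) :: rest]) cur
            else cur)
          []
    (best, cur) :: table

def get_valid_segmentations_alt (sentence : String) (pronunciation_dict : List (String × String)) : List (List String × List String) :=
  let d := PySem.Dict.mk pronunciation_dict
  let table := pvBuild d sentence.toList
  (PySem.List.pyGetD table 0 (none, [])).2.map (fun seg => (seg, seg.map (fun t => d.getD t "")))

-- ===== PRECONDITION & SPEC =====

def Spec_get_valid_segmentations (sentence : String) (pronunciation_dict : List (String × String)) (out : List (List String × List String)) : Prop := out = get_valid_segmentations_alt sentence pronunciation_dict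
instance (sentence : String) (pronunciation_dict : List (String × String)) (out : List (List String × List String)) : Decidable (Spec_get_valid_segmentations sentence pronunciation_dict out) := by unfold Spec_get_valid_segmentations; infer_instance

-- ===== CLAIM (what is proved, stated in full; the proofs are below) =====
def Claim_equal_get_valid_segmentations : Prop := ∀ (sentence : String) (pronunciation_dict : List (String × String)), Dom_get_valid_segmentations sentence pronunciation_dict → Spec_get_valid_segmentations sentence pronunciation_dict (get_valid_segmentations sentence pronunciation_dict)

-- ===== LEMMAS AND PROOFS =====

-- proof-only helpers -------------------------------------------------------

-- all tokens of a segmentation have a pronunciation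
def pvAllValid (d : PySem.Dict String String) (g : List String) : Bool :=
  g.all (fun t => d.contains t)

-- "valid and exactly k tokens"
def pvBv (d : PySem.Dict String String) (k : Nat) (g : List String) : Bool :=
  pvAllValid d g && (g.length == k)

def pvPair (d : PySem.Dict String String) (g : List String) : List String × List String :=
  (g, g.map (fun t => d.getD t ""))

-- canonical enumeration of the valid segmentations with exactly k tokens,
-- ordered by first-token length ascending, then recursively
def pvE (d : PySem.Dict String String) : Nat → List Char → List (List String)
  | 0, s => if s = [] then [[]] else []
  | k+1, s =>
    if s = [] then [] else
      (List.range s.length).flatMap (fun j =>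
        if d.contains (String.ofList (s.take (j+1))) then
          (pvE d k (s.drop (j+1))).map (fun rest => String.ofList (s.take (j+1)) :: rest)
        else [])

-- minimal valid token count of s (none if no valid segmentation exists)
def pvM (d : PySem.Dict String String) (s : List Char) : Option Nat :=
  ((List.range (s.length + 1)).filter (fun k => decide (pvE d k s ≠ []))).min?

def pvF (d : PySem.Dict String String) (s : List Char) : List (List String) :=
  match pvM d s with
  | none => []
  | some k => pvE d k s

def pvCand (d : PySem.Dict String String) (s : List Char) (j : Nat) : Option Nat :=
  if d.contains (String.ofList (s.take (j+1))) then (pvM d (s.drop (j+1))).map (· + 1) else none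

def pvOmin : Option Nat → Option Nat → Option Nat
  | none, b => b
  | some a, none => some a
  | some a, some b => some (min a b)

-- lemmas -------------------------------------------------------------------

theorem pvPronLoop_of_all (d : PySem.Dict String String) (g : List String)
    (h : pvAllValid d g = true) : pvPronLoop d g = g.map (fun t => d.getD t "") := by
  induction g with
  | nil => rfl
  | cons t ts ih =>
    simp only [pvAllValid, List.all_cons, Bool.and_eq_true] at h
    simp [pvPronLoop, h.1, ih (by simp [pvAllValid, h.2])]

theorem pvPronLoop_len_iff (d : PySem.Dict String String) (g : List String) :
    (pvPronLoop d g).length = g.length ↔ pvAllValid d g = true := by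
  induction g with
  | nil => simp [pvPronLoop, pvAllValid]
  | cons t ts ih =>
    by_cases h : d.contains t = true
    · simp [pvPronLoop, pvAllValid, h] at ih ⊢
      exact ih
    · simp [pvPronLoop, pvAllValid, h]

theorem pvE_ne_nil_le (d : PySem.Dict String String) :
    ∀ (k : Nat) (s : List Char), pvE d k s ≠ [] → k ≤ s.length := by
  intro k
  induction k with
  | zero => intro s _; exact Nat.zero_le _
  | succ k ih =>
    intro s h
    by_cases hs : s = []
    · simp [pvE, hs] at h
    · simp only [pvE, if_neg hs] at h
      rw [Ne, List.flatMap_eq_nil_iff] at h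
      push_neg at h
      obtain ⟨j, hj, hne⟩ := h
      rw [List.mem_range] at hj
      by_cases hc : d.contains (String.ofList (s.take (j+1))) = true
      · rw [if_pos hc] at hne
        have h2 : pvE d k (s.drop (j+1)) ≠ [] := by
          intro h0; simp [h0] at hne
        have h3 := ih _ h2
        simp only [List.length_drop] at h3
        omega
      · simp [hc] at hne

theorem pvE_succ_ne_nil_iff (d : PySem.Dict String String) (k : Nat) (s : List Char) (hs : s ≠ []) :
    pvE d (k+1) s ≠ [] ↔ ∃ j < s.length, d.contains (String.ofList (s.take (j+1))) = true ∧ pvE d k (s.drop (j+1)) ≠ [] := by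
  simp only [pvE, if_neg hs, Ne, List.flatMap_eq_nil_iff]
  push_neg
  constructor
  · rintro ⟨j, hj, hne⟩
    rw [List.mem_range] at hj
    by_cases hc : d.contains (String.ofList (s.take (j+1))) = true
    · rw [if_pos hc] at hne
      exact ⟨j, hj, hc, by intro h0; simp [h0] at hne⟩
    · simp [hc] at hne
  · rintro ⟨j, hj, hc, hne⟩
    refine ⟨j, List.mem_range.2 hj, ?_⟩
    rw [if_pos hc]
    simp [hne]

theorem pvM_eq_some_iff (d : PySem.Dict String String) (s : List Char) (m : Nat) :
    pvM d s = some m ↔ (pvE d m s ≠ [] ∧ ∀ k < m, pvE d k s = []) := by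
  unfold pvM
  rw [List.min?_eq_some_iff]
  simp only [List.mem_filter, List.mem_range, decide_eq_true_eq]
  constructor
  · rintro ⟨⟨_, hne⟩, hmin⟩
    refine ⟨hne, fun k hk => ?_⟩
    by_contra hke
    have hk2 : k < s.length + 1 := by
      have := pvE_ne_nil_le d k s hke
      omega
    have := hmin k ⟨hk2, hke⟩
    omega
  · rintro ⟨hne, hmin⟩
    have hm : m < s.length + 1 := by
      have := pvE_ne_nil_le d m s hne
      omega
    refine ⟨⟨hm, hne⟩, fun b hb => ?_⟩
    by_contra hlt
    exact hb.2 (hmin b (by omega))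

theorem pvM_eq_none_iff (d : PySem.Dict String String) (s : List Char) :
    pvM d s = none ↔ ∀ k, pvE d k s = [] := by
  unfold pvM
  rw [List.min?_eq_none_iff, List.filter_eq_nil_iff]
  simp only [List.mem_range, decide_eq_true_eq, not_not]
  constructor
  · intro h k
    by_cases hk : k < s.length + 1
    · exact h k hk
    · by_contra hne
      have := pvE_ne_nil_le d k s hne
      omega
  · intro h k _
    exact h k

theorem pvM_pos (d : PySem.Dict String String) (c : Char) (cs : List Char) (b : Nat)
    (h : pvM d (c :: cs) = some b) : 1 ≤ b := by
  have h2 := ((pvM_eq_some_iff d _ b).1 h).1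
  rcases b with _ | b
  · simp [pvE] at h2
  · omega

theorem pvM_rec (d : PySem.Dict String String) (c : Char) (cs : List Char) :
    pvM d (c :: cs) = ((List.range (c :: cs).length).filterMap (pvCand d (c :: cs))).min? := by
  have hs : (c :: cs) ≠ [] := by simp
  -- every candidate value v has pvE d v (c :: cs) ≠ []
  have hcand : ∀ v, (∃ j ∈ List.range (c :: cs).length, pvCand d (c :: cs) j = some v) →
      pvE d v (c :: cs) ≠ [] := by
    rintro v ⟨j, hj, hcv⟩
    rw [List.mem_range] at hj
    unfold pvCand at hcv
    by_cases hc : d.contains (String.ofList ((c :: cs).take (j+1))) = true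
    · rw [if_pos hc] at hcv
      rw [Option.map_eq_some_iff] at hcv
      obtain ⟨w, hw, rfl⟩ := hcv
      have hEw := ((pvM_eq_some_iff d _ w).1 hw).1
      exact (pvE_succ_ne_nil_iff d w _ hs).2 ⟨j, hj, hc, hEw⟩
    · rw [if_neg hc] at hcv
      exact absurd hcv (by simp)
  cases hM : pvM d (c :: cs) with
  | none =>
    symm
    rw [List.min?_eq_none_iff, List.filterMap_eq_nil_iff]
    intro j hj
    by_contra hne
    rw [← Ne, Option.ne_none_iff_exists'] at hne
    obtain ⟨v, hv⟩ := hne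
    exact hcand v ⟨j, hj, hv⟩ ((pvM_eq_none_iff d _).1 hM v)
  | some m =>
    symm
    rw [List.min?_eq_some_iff]
    obtain ⟨hEm, hmin⟩ := (pvM_eq_some_iff d _ m).1 hM
    have hm1 : 1 ≤ m := pvM_pos d c cs m hM
    constructor
    · -- m is a candidate
      have hEm' : pvE d ((m - 1) + 1) (c :: cs) ≠ [] := by
        rwa [Nat.sub_add_cancel hm1]
      obtain ⟨j, hj, hc, hne⟩ := (pvE_succ_ne_nil_iff d (m-1) _ hs).1 hEm'
      -- pvM of the suffix
      cases hMd : pvM d ((c :: cs).drop (j+1)) with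
      | none => exact absurd ((pvM_eq_none_iff d _).1 hMd (m-1)) hne
      | some w =>
        obtain ⟨hEw, hwmin⟩ := (pvM_eq_some_iff d _ w).1 hMd
        have hwle : w ≤ m - 1 := by
          by_contra hgt
          exact hne (hwmin (m-1) (by omega))
        have hcw : pvCand d (c :: cs) j = some (w + 1) := by
          unfold pvCand
          rw [if_pos hc, hMd]
          rfl
        have hge : m ≤ w + 1 := by
          by_contra hlt
          exact hcand (w+1) ⟨j, List.mem_range.2 hj, hcw⟩ (hmin (w+1) (by omega))
        have hwm : w = m - 1 := by omega
        rw [List.mem_filterMap]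
        exact ⟨j, List.mem_range.2 hj, by rw [hcw, hwm, Nat.sub_add_cancel hm1]⟩
    · -- minimality
      intro b hb
      rw [List.mem_filterMap] at hb
      obtain ⟨j, hj, hcb⟩ := hb
      have hEb := hcand b ⟨j, hj, hcb⟩
      by_contra hlt
      exact hEb (hmin b (by omega))

-- one step of the "best = min" accumulator of B's first inner loop
def pvStep : Option Nat → Option Nat → Option Nat := fun b o =>
  match o with
  | some v =>
    match b with
    | none => some v
    | some b0 => if v < b0 then some v else some b0
  | none => b

theorem pvOmin_foldl (l : List (Option Nat)) (acc : Option Nat) :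
    l.foldl pvStep acc = pvOmin acc (l.filterMap id).min? := by
  unfold pvStep
  induction l generalizing acc with
  | nil => cases acc <;> rfl
  | cons o l ih =>
    cases o with
    | none => simpa using ih acc
    | some v =>
      have hfm : List.filterMap id (some v :: l) = v :: List.filterMap id l := by simp
      rw [List.foldl_cons, hfm, List.min?_cons, ih]
      cases acc with
      | none => cases h : (List.filterMap id l).min? <;> simp [pvOmin, h]
      | some a =>
        cases h : (List.filterMap id l).min? <;>
          simp only [pvOmin, Option.elim] <;> split_ifs <;>
          simp only [Option.some.injEq] <;> omega

theorem pvZipIdx_range (m i : Nat) :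
    (List.range m).zipIdx i = (List.range m).map (fun j => (j, i + j)) := by
  induction m with
  | zero => rfl
  | succ m ih =>
    rw [List.range_succ, List.zipIdx_append, ih]
    simp

theorem pvTails_eq (cs : List Char) :
    List.tails cs = (List.range (cs.length + 1)).map (fun k => cs.drop k) := by
  induction cs with
  | nil => rfl
  | cons c cs ih =>
    rw [List.tails_cons, List.length_cons, List.range_succ_eq_map]
    simp only [List.map_cons, List.drop_zero, List.map_map]
    congr 1

theorem pvZipTails (d : PySem.Dict String String) (cs : List Char) :
    ((List.tails cs).map (fun t => (pvM d t, pvF d t))).zipIdx 1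
      = (List.range (cs.length + 1)).map (fun j => ((pvM d (cs.drop j), pvF d (cs.drop j)), j + 1)) := by
  rw [pvTails_eq, List.map_map, List.zipIdx_map, pvZipIdx_range]
  simp [List.map_map, Function.comp_def, Nat.one_add]

theorem pvBest_eq (d : PySem.Dict String String) (c : Char) (cs : List Char) :
    (((List.tails cs).map (fun t => (pvM d t, pvF d t))).zipIdx 1).foldl
      (fun best p =>
        match p.1.1 with
        | some mt =>
          if d.contains (String.ofList ((c :: cs).take p.2)) then
            match best with
            | none => some (mt + 1)
            | some b => if mt + 1 < b then some (mt + 1) else some b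
          else best
        | none => best) none = pvM d (c :: cs) := by
  rw [pvZipTails, List.foldl_map]
  rw [PySem.List.foldl_congr_mem _ _ (fun b j => pvStep b (pvCand d (c :: cs) j)) _ ?_]
  · rw [← List.foldl_map (f := pvCand d (c :: cs)) (g := pvStep), pvOmin_foldl]
    show pvOmin none ((((List.range (cs.length + 1)).map (pvCand d (c :: cs))).filterMap id).min?)
        = pvM d (c :: cs)
    rw [List.filterMap_map]
    have hid : (id ∘ pvCand d (c :: cs)) = pvCand d (c :: cs) := rfl
    rw [hid, pvM_rec d c cs, List.length_cons]
    cases ((List.range (cs.length + 1)).filterMap (pvCand d (c :: cs))).min? <;> rfl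
  · intro b j _
    show (match pvM d (cs.drop j) with
          | some mt =>
            if d.contains (String.ofList ((c :: cs).take (j+1))) then
              match b with
              | none => some (mt + 1)
              | some b0 => if mt + 1 < b0 then some (mt + 1) else some b0
            else b
          | none => b) = pvStep b (pvCand d (c :: cs) j)
    unfold pvCand pvStep
    rw [List.drop_succ_cons]
    cases hm : pvM d (cs.drop j) with
    | none =>
      by_cases hcn : d.contains (String.ofList (c :: cs.take j)) = true <;> simp [hcn]
    | some mt =>
      by_cases hcn : d.contains (String.ofList (c :: cs.take j)) = true <;>
        cases b <;> simp [hcn]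

theorem pvCur_eq (d : PySem.Dict String String) (c : Char) (cs : List Char) (b : Nat)
    (hM : pvM d (c :: cs) = some b) :
    (((List.tails cs).map (fun t => (pvM d t, pvF d t))).zipIdx 1).foldl
      (fun cur p =>
        if p.1.1 = some (b - 1) ∧ d.contains (String.ofList ((c :: cs).take p.2)) = true then
          p.1.2.foldl (fun cur rest => cur ++ [String.ofList ((c :: cs).take p.2) :: rest]) cur
        else cur) [] = pvE d b (c :: cs) := by
  have hb1 : 1 ≤ b := pvM_pos d c cs b hM
  have hble : ∀ j w, d.contains (String.ofList ((c :: cs).take (j+1))) = true →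
      j < cs.length + 1 → pvM d (cs.drop j) = some w → b ≤ w + 1 := by
    intro j w hcn hj hm
    have hM' := hM
    rw [pvM_rec d c cs] at hM'
    refine (List.min?_eq_some_iff.1 hM').2 (w+1) ?_
    rw [List.mem_filterMap]
    refine ⟨j, List.mem_range.2 (by simpa using hj), ?_⟩
    unfold pvCand
    rw [if_pos hcn, List.drop_succ_cons, hm]
    rfl
  rw [pvZipTails, List.foldl_map]
  rw [PySem.List.foldl_congr_mem _ _
    (fun cur j => cur ++
      (if pvM d (cs.drop j) = some (b - 1) ∧
          d.contains (String.ofList ((c :: cs).take (j+1))) = true then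
        (pvF d (cs.drop j)).map (fun rest => String.ofList ((c :: cs).take (j+1)) :: rest)
      else [])) _ ?_]
  · rw [PySem.List.foldl_append_eq_flatMap, List.nil_append]
    have hbb : b = (b - 1) + 1 := by omega
    rw [hbb]
    show List.flatMap _ (List.range (cs.length + 1)) = pvE d ((b-1)+1) (c :: cs)
    rw [show pvE d ((b-1)+1) (c :: cs)
          = (List.range (c :: cs).length).flatMap (fun j =>
              if d.contains (String.ofList ((c :: cs).take (j+1))) = true then
                (pvE d (b-1) ((c :: cs).drop (j+1))).map
                  (fun rest => String.ofList ((c :: cs).take (j+1)) :: rest)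
              else []) by simp only [pvE, if_neg (List.cons_ne_nil c cs)]]
    rw [List.length_cons]
    apply List.flatMap_congr
    intro j hj
    rw [List.drop_succ_cons]
    have hb' : (b - 1) + 1 - 1 = b - 1 := by omega
    rw [hb']
    cases hm : pvM d (cs.drop j) with
    | none =>
      have hE : pvE d (b-1) (cs.drop j) = [] := (pvM_eq_none_iff d _).1 hm (b-1)
      by_cases hcn : d.contains (String.ofList ((c :: cs).take (j+1))) = true <;>
        simp [hcn, hE, hm]
    | some w =>
      by_cases hcn : d.contains (String.ofList ((c :: cs).take (j+1))) = true
      · by_cases hw : w = b - 1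
        · rw [if_pos ⟨by rw [hw], hcn⟩, if_pos hcn]
          have hF : pvF d (cs.drop j) = pvE d (b-1) (cs.drop j) := by
            simp [pvF, hm, hw]
          rw [hF]
        · have hlt : b - 1 < w := by
            have := hble j w hcn (List.mem_range.1 hj) hm
            omega
          have hE : pvE d (b-1) (cs.drop j) = [] :=
            ((pvM_eq_some_iff d _ w).1 hm).2 (b-1) hlt
          rw [if_neg (by rintro ⟨h1, _⟩; exact hw (by injection h1)), if_pos hcn, hE,
            List.map_nil]
      · rw [if_neg (by rintro ⟨_, h2⟩; exact hcn h2), if_neg hcn]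
  · intro acc j _
    show (if pvM d (cs.drop j) = some (b - 1) ∧
            d.contains (String.ofList ((c :: cs).take (j+1))) = true then
          (pvF d (cs.drop j)).foldl
            (fun cur rest => cur ++ [String.ofList ((c :: cs).take (j+1)) :: rest]) acc
        else acc)
      = acc ++ (if pvM d (cs.drop j) = some (b - 1) ∧
            d.contains (String.ofList ((c :: cs).take (j+1))) = true then
          (pvF d (cs.drop j)).map (fun rest => String.ofList ((c :: cs).take (j+1)) :: rest)
        else [])
    by_cases hcond : pvM d (cs.drop j) = some (b - 1) ∧
        d.contains (String.ofList ((c :: cs).take (j+1))) = true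
    · rw [if_pos hcond, if_pos hcond, PySem.List.foldl_append_singleton_eq_map]
    · rw [if_neg hcond, if_neg hcond, List.append_nil]

theorem pvBuild_eq (d : PySem.Dict String String) (cs : List Char) :
    pvBuild d cs = (List.tails cs).map (fun t => (pvM d t, pvF d t)) := by
  induction cs with
  | nil => rfl
  | cons c cs ih =>
    show pvBuild d (c :: cs) = ((c :: cs) :: List.tails cs).map (fun t => (pvM d t, pvF d t))
    rw [List.map_cons, pvBuild, ih, pvBest_eq d c cs]
    congr 1
    congr 1
    cases hM : pvM d (c :: cs) with
    | none => simp [pvF, hM]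
    | some b =>
      rw [show pvF d (c :: cs) = pvE d b (c :: cs) by simp [pvF, hM]]
      exact pvCur_eq d c cs b hM

-- stability of the insertion sort under a length-fixing filter
theorem pvFilter_insertBy_not (p : List String → Bool) (x : List String) (acc : List (List String))
    (hx : p x = false) :
    (PySem.List.insertBy (fun a b => decide (PySem.List.len a < PySem.List.len b)) x acc).filter p = acc.filter p := by
  induction acc with
  | nil => simp [PySem.List.insertBy, hx]
  | cons y ys ih =>
    simp only [PySem.List.insertBy]
    split_ifs with h
    · simp [List.filter_cons, hx]
    · simp only [PySem.List.len_eq, Nat.cast_lt] at ih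
      simp [List.filter_cons, ih]

theorem pvFilter_insertBy_yes (p : List String → Bool) (m : Int) (x : List String) (acc : List (List String))
    (hpw : acc.Pairwise (fun a b => PySem.List.len a ≤ PySem.List.len b))
    (hkey : ∀ a, p a = true → PySem.List.len a = m) (hx : p x = true) :
    (PySem.List.insertBy (fun a b => decide (PySem.List.len a < PySem.List.len b)) x acc).filter p
      = acc.filter p ++ [x] := by
  induction acc with
  | nil => simp [PySem.List.insertBy, hx]
  | cons y ys ih =>
    rw [List.pairwise_cons] at hpw
    simp only [PySem.List.insertBy]
    split_ifs with h
    · rw [decide_eq_true_iff] at h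
      have hxm : PySem.List.len x = m := hkey x hx
      have hnil : (y :: ys).filter p = [] := by
        rw [List.filter_eq_nil_iff]
        intro a ha hpa
        have ham : PySem.List.len a = m := hkey a hpa
        rcases List.mem_cons.mp ha with rfl | hmem
        · omega
        · have := hpw.1 a hmem
          omega
      simp [List.filter_cons, hx, hnil]
    · have ih' := ih hpw.2
      simp only [PySem.List.len_eq, Nat.cast_lt] at ih'
      simp only [List.filter_cons]
      split <;> simp [ih']

theorem pvFilter_sorted (p : List String → Bool) (m : Int) (xs : List (List String))
    (hkey : ∀ a, p a = true → PySem.List.len a = m) :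
    (PySem.List.sorted xs (fun x => PySem.List.len x)).filter p = xs.filter p := by
  induction xs using List.reverseRecOn with
  | nil => rfl
  | append_singleton xs x ih =>
    rw [PySem.List.sorted_eq_foldl_insertBy, List.foldl_append, List.foldl_cons, List.foldl_nil,
      ← PySem.List.sorted_eq_foldl_insertBy]
    have hpw := PySem.List.sorted_pairwise xs (fun g => PySem.List.len g)
    by_cases hx : p x = true
    · rw [pvFilter_insertBy_yes p m x _ hpw hkey hx, ih, List.filter_append, List.filter_cons]
      simp [hx]
    · rw [pvFilter_insertBy_not p x _ (by simpa using hx), ih, List.filter_append, List.filter_cons]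
      simp [hx]

-- A's enumeration, filtered to "valid with exactly k tokens", is the canonical enumeration
theorem pvFilter_allSegs_nil (d : PySem.Dict String String) (k : Nat) :
    (get_all_segmentations_chars []).filter (pvBv d k) = pvE d k [] := by
  rw [get_all_segmentations_chars]
  cases k <;> simp [pvBv, pvAllValid, pvE]

theorem pvFilter_allSegs_one (d : PySem.Dict String String) (c : Char) (k : Nat) :
    (get_all_segmentations_chars [c]).filter (pvBv d k) = pvE d k [c] := by
  rw [get_all_segmentations_chars]
  rw [dif_neg (by simp [PySem.List.len_eq]), dif_pos (by simp [PySem.List.len_eq])]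
  cases k with
  | zero => simp [pvBv, pvAllValid, pvE]
  | succ k =>
    by_cases hc : d.contains (String.ofList [c]) = true <;>
      cases k <;>
      simp [pvBv, pvAllValid, pvE, hc, List.filter_cons]

theorem pvFilter_allSegs (d : PySem.Dict String String) :
    ∀ (s : List Char) (k : Nat),
      (get_all_segmentations_chars s).filter (pvBv d k) = pvE d k s := by
  suffices h : ∀ (n : Nat) (s : List Char), s.length ≤ n → ∀ (k : Nat),
      (get_all_segmentations_chars s).filter (pvBv d k) = pvE d k s by
    intro s k
    exact h s.length s le_rfl k
  intro n
  induction n with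
  | zero =>
    intro s hs k
    have hnil : s = [] := List.length_eq_zero_iff.1 (Nat.le_zero.1 hs)
    subst hnil
    exact pvFilter_allSegs_nil d k
  | succ n ih =>
    intro s hs k
    match s, hs with
    | [], _ => exact pvFilter_allSegs_nil d k
    | [c], _ => exact pvFilter_allSegs_one d c k
    | c0 :: c1 :: cs, hs =>
      set s := c0 :: c1 :: cs with hsdef
      have hsne : s ≠ [] := by simp [hsdef]
      have hslen : s.length = cs.length + 2 := by simp [hsdef]
      rw [get_all_segmentations_chars]
      rw [dif_neg (by simp [PySem.List.len_eq, hslen]; omega), dif_neg (by simp [PySem.List.len_eq, hslen]; omega)]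
      simp only []
      rw [pvFilter_sorted (pvBv d k) (k : Int) _
        (by intro a ha
            simp only [pvBv, Bool.and_eq_true, beq_iff_eq] at ha
            simp [PySem.List.len_eq, ha.2])]
      rw [List.foldl_attach
            (l := PySem.List.pyRange 1 (PySem.List.len s + 1) 1)
            (f := fun result i =>
              List.foldl (fun result suffix =>
                  result ++ [String.ofList (PySem.List.slice s none (some i)) :: suffix])
                result (get_all_segmentations_chars (PySem.List.slice s (some i) none)))
            (b := []),
          PySem.List.pyRange_one]
      simp only [PySem.List.foldl_append_singleton_eq_map]
      rw [PySem.List.foldl_append_eq_flatMap, List.nil_append]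
      have htn : ((PySem.List.len s + 1) - 1).toNat = s.length := by
        simp [PySem.List.len_eq]
      rw [htn, List.flatMap_map, List.filter_flatMap]
      -- per-branch slices
      have hsl1 : ∀ j : Nat, PySem.List.slice s none (some (1 + (j : Int))) = s.take (j+1) := by
        intro j
        rw [PySem.List.slice_to s (by omega)]
        congr 1
        omega
      have hsl2 : ∀ j : Nat, PySem.List.slice s (some (1 + (j : Int))) none = s.drop (j+1) := by
        intro j
        rw [PySem.List.slice_from s (by omega)]
        congr 1
        omega
      cases k with
      | zero =>
        rw [show pvE d 0 s = [] by simp [pvE, hsne]]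
        rw [List.flatMap_eq_nil_iff]
        intro j _
        rw [List.filter_map, List.filter_eq_nil_iff.2 ?_, List.map_nil]
        intro x _
        simp [Function.comp, pvBv]
      | succ k =>
        rw [show pvE d (k+1) s
              = (List.range s.length).flatMap (fun j =>
                  if d.contains (String.ofList (s.take (j+1))) = true then
                    (pvE d k (s.drop (j+1))).map (fun rest => String.ofList (s.take (j+1)) :: rest)
                  else []) by
          simp only [pvE, if_neg hsne]]
        apply List.flatMap_congr
        intro j hj
        rw [List.mem_range] at hj
        rw [hsl1 j, hsl2 j, List.filter_map]
        have hdlen : (s.drop (j+1)).length ≤ n := by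
          rw [List.length_drop]
          omega
        by_cases hc : d.contains (String.ofList (s.take (j+1))) = true
        · rw [if_pos hc]
          congr 1
          rw [List.filter_congr (q := pvBv d k) ?_]
          · exact ih (s.drop (j+1)) hdlen k
          · intro x _
            simp [Function.comp, pvBv, pvAllValid, List.all_cons, hc]
        · rw [if_neg hc]
          rw [List.filter_eq_nil_iff.2 ?_, List.map_nil]
          intro x _
          simp [Function.comp, pvBv, pvAllValid, List.all_cons, hc]

theorem pvAllSegs_pairwise (s : List Char) :
    (get_all_segmentations_chars s).Pairwise (fun a b => PySem.List.len a ≤ PySem.List.len b) := by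
  rw [get_all_segmentations_chars]
  split_ifs with h0 h1
  · simp
  · simp
  · exact PySem.List.sorted_pairwise _ _

-- A's selection loop ------------------------------------------------------

theorem pvLoop2 (d : PySem.Dict String String) (L : List (List String))
    (vs : List (List String × List String)) (m : Nat)
    (hne : vs ≠ []) (hm : (PySem.List.pyGetD vs 0 ([], [])).1.length = m)
    (hL : ∀ g ∈ L, m ≤ g.length) :
    L.foldl
      (fun valid_segmentations segmentation =>
        if PySem.List.len valid_segmentations = 0 ∨
            PySem.List.len segmentation ≤ PySem.List.len (PySem.List.pyGetD valid_segmentations 0 ([], [])).1 then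
          if PySem.List.len (pvPronLoop d segmentation) = PySem.List.len segmentation then
            valid_segmentations ++ [(segmentation, pvPronLoop d segmentation)]
          else valid_segmentations
        else valid_segmentations) vs
    = vs ++ (L.filter (pvBv d m)).map (pvPair d) := by
  induction L generalizing vs with
  | nil => simp
  | cons g L ihL =>
    have hgm := hL g List.mem_cons_self
    have hL' : ∀ h ∈ L, m ≤ h.length := fun h hh => hL h (List.mem_cons_of_mem _ hh)
    rw [List.foldl_cons]
    by_cases hcond : PySem.List.len g ≤ PySem.List.len (PySem.List.pyGetD vs 0 ([], [])).1
    · rw [if_pos (Or.inr hcond)]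
      have hglen : g.length = m := by
        simp only [PySem.List.len_eq, hm] at hcond
        exact_mod_cast le_antisymm (by exact_mod_cast hcond) hgm
      by_cases hv : PySem.List.len (pvPronLoop d g) = PySem.List.len g
      · rw [if_pos hv]
        have hall : pvAllValid d g = true := (pvPronLoop_len_iff d g).1 (by
          simp only [PySem.List.len_eq, Nat.cast_inj] at hv
          exact hv)
        have hm' : (PySem.List.pyGetD (vs ++ [(g, pvPronLoop d g)]) 0 ([], [])).1.length = m := by
          rcases vs with _ | ⟨v, vs'⟩
          · exact absurd rfl hne
          · simpa using hm
        rw [ihL (vs ++ [(g, pvPronLoop d g)]) (by simp) hm' hL']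
        rw [List.filter_cons, show pvBv d m g = true by simp [pvBv, hall, hglen]]
        simp [pvPair, pvPronLoop_of_all d g hall, List.append_assoc]
      · rw [if_neg hv]
        have hnall : pvAllValid d g = false := by
          cases h2 : pvAllValid d g
          · rfl
          · exact absurd (by
              simp only [PySem.List.len_eq, Nat.cast_inj]
              exact (pvPronLoop_len_iff d g).2 h2) hv
        rw [ihL vs hne hm hL']
        rw [List.filter_cons, show pvBv d m g = false by simp [pvBv, hnall]]
        simp
    · have hnb : pvBv d m g = false := by
        have : ¬ g.length = m := by
          simp only [PySem.List.len_eq, hm] at hcond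
          intro h
          exact hcond (by exact_mod_cast le_of_eq h)
        simp [pvBv, this]
      have hlen0 : ¬ (PySem.List.len vs = 0) := by
        simp only [PySem.List.len_eq, Nat.cast_eq_zero, List.length_eq_zero_iff]
        exact hne
      rw [if_neg (by
        rintro (h | h)
        · exact hlen0 h
        · exact hcond h)]
      rw [ihL vs hne hm hL']
      rw [List.filter_cons, hnb]
      simp

theorem pvLoop1 (d : PySem.Dict String String) (L : List (List String))
    (hpw : L.Pairwise (fun a b => PySem.List.len a ≤ PySem.List.len b)) :
    L.foldl
      (fun valid_segmentations segmentation =>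
        if PySem.List.len valid_segmentations = 0 ∨
            PySem.List.len segmentation ≤ PySem.List.len (PySem.List.pyGetD valid_segmentations 0 ([], [])).1 then
          if PySem.List.len (pvPronLoop d segmentation) = PySem.List.len segmentation then
            valid_segmentations ++ [(segmentation, pvPronLoop d segmentation)]
          else valid_segmentations
        else valid_segmentations) []
    = match ((L.filter (pvAllValid d)).map List.length).min? with
      | none => []
      | some m => (L.filter (pvBv d m)).map (pvPair d) := by
  induction L with
  | nil => rfl
  | cons g L ihL =>
    rw [List.pairwise_cons] at hpw
    rw [List.foldl_cons]
    rw [if_pos (Or.inl (by simp [PySem.List.len_eq]))]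
    by_cases hall : pvAllValid d g = true
    · have hplen : PySem.List.len (pvPronLoop d g) = PySem.List.len g := by
        simp only [PySem.List.len_eq, Nat.cast_inj]
        exact (pvPronLoop_len_iff d g).2 hall
      rw [if_pos hplen, List.nil_append]
      rw [pvLoop2 d L [(g, pvPronLoop d g)] g.length (by simp) (by simp)
        (by intro h hh
            have := hpw.1 h hh
            simp only [PySem.List.len_eq, Nat.cast_le] at this
            exact this)]
      have hmin : (((g :: L).filter (pvAllValid d)).map List.length).min? = some g.length := by
        rw [List.min?_eq_some_iff]
        constructor
        · simp [List.filter_cons, hall]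
        · intro b hb
          simp only [List.filter_cons, hall, if_true, List.map_cons, List.mem_cons] at hb
          rcases hb with rfl | hb
          · exact le_rfl
          · rw [List.mem_map] at hb
            obtain ⟨h, hh, rfl⟩ := hb
            have := hpw.1 h (List.mem_of_mem_filter hh)
            simp only [PySem.List.len_eq, Nat.cast_le] at this
            exact this
      rw [hmin]
      show [(g, pvPronLoop d g)] ++ List.map (pvPair d) (List.filter (pvBv d g.length) L)
          = List.map (pvPair d) (List.filter (pvBv d g.length) (g :: L))
      rw [List.filter_cons, show pvBv d g.length g = true by simp [pvBv, hall]]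
      simp [pvPair, pvPronLoop_of_all d g hall]
    · have hplen : ¬ (PySem.List.len (pvPronLoop d g) = PySem.List.len g) := by
        intro h
        refine absurd ((pvPronLoop_len_iff d g).1 ?_) hall
        simp only [PySem.List.len_eq, Nat.cast_inj] at h
        exact h
      rw [if_neg hplen]
      have hfa : (g :: L).filter (pvAllValid d) = L.filter (pvAllValid d) := by
        simp [List.filter_cons, hall]
      rw [hfa, ihL hpw.2]
      cases hmin : ((L.filter (pvAllValid d)).map List.length).min? with
      | none => rfl
      | some m =>
        show List.map (pvPair d) (List.filter (pvBv d m) L)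
            = List.map (pvPair d) (List.filter (pvBv d m) (g :: L))
        rw [List.filter_cons, show pvBv d m g = false by
          cases h2 : pvAllValid d g
          · simp [pvBv, h2]
          · exact absurd h2 hall]
        simp

theorem pvMin_link (d : PySem.Dict String String) (s : List Char) :
    (((get_all_segmentations_chars s).filter (pvAllValid d)).map List.length).min? = pvM d s := by
  have hmem : ∀ k : Nat,
      k ∈ ((get_all_segmentations_chars s).filter (pvAllValid d)).map List.length ↔
        pvE d k s ≠ [] := by
    intro k
    rw [List.mem_map]
    constructor
    · rintro ⟨g, hg, rfl⟩
      rw [List.mem_filter] at hg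
      have hg2 : g ∈ (get_all_segmentations_chars s).filter (pvBv d g.length) :=
        List.mem_filter.2 ⟨hg.1, by simp [pvBv, hg.2]⟩
      rw [pvFilter_allSegs d s g.length] at hg2
      intro h
      rw [h] at hg2
      exact absurd hg2 (List.not_mem_nil)
    · intro h
      obtain ⟨g, hg⟩ := List.exists_mem_of_ne_nil _ h
      rw [← pvFilter_allSegs d s k, List.mem_filter] at hg
      have hbv := hg.2
      simp only [pvBv, Bool.and_eq_true, beq_iff_eq] at hbv
      exact ⟨g, List.mem_filter.2 ⟨hg.1, hbv.1⟩, hbv.2⟩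
  cases hM : pvM d s with
  | none =>
    rw [List.min?_eq_none_iff, List.eq_nil_iff_forall_not_mem]
    intro k hk
    exact (hmem k).1 hk ((pvM_eq_none_iff d s).1 hM k)
  | some m =>
    rw [List.min?_eq_some_iff]
    obtain ⟨hEm, hmin⟩ := (pvM_eq_some_iff d s m).1 hM
    refine ⟨(hmem m).2 hEm, fun b hb => ?_⟩
    by_contra h
    exact (hmem b).1 hb (hmin b (by omega))

-- ===== VERDICT (by name: the statement is the Claim_ definition above) =====
theorem pvHeadTails (d : PySem.Dict String String) (t : List Char) :
    PySem.List.pyGetD ((List.tails t).map (fun u => (pvM d u, pvF d u))) 0 (none, [])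
      = (pvM d t, pvF d t) := by
  cases t <;> simp [PySem.List.pyGetD_zero, List.tails_cons]

theorem get_valid_segmentations_spec : Claim_equal_get_valid_segmentations := by
  intro sentence pronunciation_dict _
  unfold Spec_get_valid_segmentations
  simp only [get_valid_segmentations, get_valid_segmentations_alt]
  rw [pvLoop1 (PySem.Dict.mk pronunciation_dict) _ (pvAllSegs_pairwise sentence.toList)]
  rw [pvMin_link, pvBuild_eq, pvHeadTails]
  cases hM : pvM (PySem.Dict.mk pronunciation_dict) sentence.toList with
  | none => simp [pvF, hM]
  | some m =>
    simp only [pvF, hM]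
    rw [pvFilter_allSegs]
    rfl
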